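-- pv_equiv track=rewrite | github.com/akio7624/YomeiriTools | utils/Utils.py | get_root_file_padding_cnt
-- ===== SOURCE A (Python) =====
-- def get_root_file_padding_cnt(size: int) -> int:
--     if size % 512 == 0:
--         return 0
--
--     n = int(size / 512)
--
--     while True:
--         block_size = (n * 512)
--         if size <= block_size:
--             return block_size - size
--         n += 1
-- ===== SOURCE B (Python) =====
-- def get_root_file_padding_cnt(size: int) -> int:
--     return (512 - size % 512) % 512
-- ===== Notes on version B (the rewrite author's own statement) =====
-- stated objective: simpler
-- what changed: Replaced the guard plus upward-counting while loop with the closed form (512 - size % 512) % 512.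
import Mathlib
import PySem

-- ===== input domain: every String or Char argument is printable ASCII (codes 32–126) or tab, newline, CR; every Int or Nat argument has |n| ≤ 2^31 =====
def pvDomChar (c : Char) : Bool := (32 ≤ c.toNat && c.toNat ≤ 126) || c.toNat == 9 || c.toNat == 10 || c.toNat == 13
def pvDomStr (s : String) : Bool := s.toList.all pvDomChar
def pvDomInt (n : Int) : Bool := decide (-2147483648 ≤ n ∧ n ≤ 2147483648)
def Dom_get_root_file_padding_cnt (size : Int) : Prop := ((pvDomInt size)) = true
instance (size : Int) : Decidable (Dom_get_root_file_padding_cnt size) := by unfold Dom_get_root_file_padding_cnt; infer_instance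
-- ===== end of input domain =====

-- B replaces A's guard plus upward-counting while loop with the closed form (512 - size % 512) % 512 (simpler).

-- ===== PORT A =====
-- the `while True` loop: n counts upward until size ≤ n*512
def pvLoopA (size n : Int) : Int :=
  let block_size := n * 512
  if h : size ≤ block_size then block_size - size
  else pvLoopA size (n + 1)
termination_by (size - n * 512).toNat
decreasing_by simp only [block_size] at h; omega

def get_root_file_padding_cnt (size : Int) : Int :=
  if PySem.Int.mod size 512 = 0 then 0
  else
    -- int(size / 512) truncates toward zero (exact here: |size| ≤ 2^31 is well below float precision)
    pvLoopA size (Int.tdiv size 512)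

-- ===== PORT B =====
def get_root_file_padding_cnt_alt (size : Int) : Int :=
  PySem.Int.mod (512 - PySem.Int.mod size 512) 512

-- ===== PRECONDITION & SPEC =====
def Spec_get_root_file_padding_cnt (size : Int) (out : Int) : Prop := out = get_root_file_padding_cnt_alt size
instance (size : Int) (out : Int) : Decidable (Spec_get_root_file_padding_cnt size out) := by unfold Spec_get_root_file_padding_cnt; infer_instance

-- ===== CLAIM (what is proved, stated in full; the proofs are below) =====
def Claim_equal_get_root_file_padding_cnt : Prop := ∀ (size : Int), Dom_get_root_file_padding_cnt size → Spec_get_root_file_padding_cnt size (get_root_file_padding_cnt size)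

-- ===== LEMMAS AND PROOFS =====

-- as long as the loop starts at an n with (n-1)*512 < size, it returns (512 - size % 512) % 512
theorem pvLoopA_eq (size : Int) : ∀ n : Int, (n - 1) * 512 < size →
    pvLoopA size n = (512 - size % 512) % 512 := by
  intro n hn
  induction n using pvLoopA.induct size with
  | case1 n bs h =>
      rw [pvLoopA, dif_pos h]
      simp only [bs] at h
      omega
  | case2 n bs h ih =>
      rw [pvLoopA, dif_neg h]
      simp only [bs] at h
      exact ih (by omega)

-- ===== VERDICT (by name: the statement is the Claim_ definition above) =====
theorem get_root_file_padding_cnt_spec : Claim_equal_get_root_file_padding_cnt := by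
  intro size _
  unfold Spec_get_root_file_padding_cnt get_root_file_padding_cnt get_root_file_padding_cnt_alt
  rw [PySem.Int.mod_eq_emod_of_pos (a := size) (by norm_num),
      PySem.Int.mod_eq_emod_of_pos (a := 512 - size % 512) (by norm_num)]
  split_ifs with h
  · omega
  · have hd := Int.mul_tdiv_add_tmod size 512
    have hub : size.tmod 512 < 512 := Int.tmod_lt_of_pos size (by norm_num)
    have hlb : -512 < size.tmod 512 := by
      have := Int.tmod_lt_of_pos (-size) (b := 512) (by norm_num)
      rw [Int.neg_tmod] at this
      omega
    exact pvLoopA_eq size _ (by omega)
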